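-- pv_equiv track=rewrite | github.com/namanag9315/ipm-porta | academic_core/views.py | _pick_gemini_model_name
-- ===== SOURCE A (Python) =====
-- def _normalize_gemini_model_name(model_name: str) -> str:
--     normalized = str(model_name or '').strip()
--     if not normalized:
--         return ''
--     if normalized.startswith('models/'):
--         return normalized.split('/', 1)[1].strip()
--     return normalized
--
-- def _pick_gemini_model_name(preferred_model: str, available_model_names: list[str]) -> str:
--     preferred = _normalize_gemini_model_name(preferred_model)
--     model_map: dict[str, str] = {}
--     for model_name in available_model_names:
--         short_name = _normalize_gemini_model_name(model_name)
--         if short_name and short_name not in model_map: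
--             model_map[short_name] = model_name
--
--     for candidate in [
--         preferred,
--         'gemini-1.5-flash',
--         'gemini-1.5-flash-latest',
--         'gemini-2.0-flash',
--         'gemini-2.5-flash',
--         'gemini-1.5-pro',
--     ]:
--         if candidate and candidate in model_map:
--             return model_map[candidate]
--
--     flash_match = next((name for short_name, name in model_map.items() if 'flash' in short_name), '')
--     if flash_match:
--         return flash_match
--
--     if model_map:
--         return next(iter(model_map.values()))
--
--     return preferred_model or 'gemini-1.5-flash'
-- ===== SOURCE B (Python) =====
-- def _normalize_gemini_model_name(model_name: str) -> str:
--     normalized = str(model_name or '').strip()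
--     if not normalized:
--         return ''
--     if normalized.startswith('models/'):
--         return normalized.split('/', 1)[1].strip()
--     return normalized
--
-- def _pick_gemini_model_name(preferred_model: str, available_model_names: list[str]) -> str:
--     def find_first(pred):
--         for name in available_model_names:
--             short = _normalize_gemini_model_name(name)
--             if short and pred(short):
--                 return name
--         return ''
--
--     preferred = _normalize_gemini_model_name(preferred_model)
--     for candidate in [
--         preferred,
--         'gemini-1.5-flash',
--         'gemini-1.5-flash-latest',
--         'gemini-2.0-flash',
--         'gemini-2.5-flash',
--         'gemini-1.5-pro',
--     ]:
--         if candidate: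
--             hit = find_first(lambda s: s == candidate)
--             if hit:
--                 return hit
--     hit = find_first(lambda s: 'flash' in s)
--     if hit:
--         return hit
--     hit = find_first(lambda s: True)
--     if hit:
--         return hit
--     return preferred_model or 'gemini-1.5-flash'
-- ===== Notes on version B (the rewrite author's own statement) =====
-- stated objective: simpler
-- what changed: Replaced the precomputed short_name->original dict with a find_first(pred) helper that rescans the available list left-to-right for each priority candidate, then for a 'flash' substring, then for any non-empty short name.
import Mathlib
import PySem

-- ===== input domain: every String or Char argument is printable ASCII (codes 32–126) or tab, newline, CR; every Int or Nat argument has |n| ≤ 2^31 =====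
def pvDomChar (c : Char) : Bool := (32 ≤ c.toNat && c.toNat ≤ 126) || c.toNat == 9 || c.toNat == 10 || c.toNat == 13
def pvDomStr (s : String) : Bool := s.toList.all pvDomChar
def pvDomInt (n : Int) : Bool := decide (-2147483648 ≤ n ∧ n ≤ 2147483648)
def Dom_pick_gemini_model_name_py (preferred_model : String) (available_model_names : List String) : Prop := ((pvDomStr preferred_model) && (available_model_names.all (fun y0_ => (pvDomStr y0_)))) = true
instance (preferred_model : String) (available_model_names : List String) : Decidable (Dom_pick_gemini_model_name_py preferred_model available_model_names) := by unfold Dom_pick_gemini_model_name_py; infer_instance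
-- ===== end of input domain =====

-- B replaces A's precomputed short_name→original dict by direct left-to-right scans of the
-- available list (a find_first helper), removing the maintained index table (objective: simpler).

-- ===== PORT A =====
-- _normalize_gemini_model_name (identical helper in both Python sources, shared by both ports)
def pvNorm (model_name : String) : String :=
  let normalized := PySem.Str.strip model_name   -- str(model_name or '').strip()
  if normalized = "" then ""
  else if PySem.Str.startswith normalized "models/" then
    -- normalized.split('/', 1)[1].strip(): index 1 exists because normalized starts with "models/"
    PySem.Str.strip (((PySem.Str.splitMax? normalized "/" 1).getD []).getD 1 "")
  else normalized

-- loop body: if short_name and short_name not in model_map: model_map[short_name] = model_name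
def pvStep (m : PySem.Dict String String) (model_name : String) : PySem.Dict String String :=
  let short_name := pvNorm model_name
  if short_name ≠ "" ∧ m.contains short_name = false then m.insert short_name model_name else m

def pvCandidates (preferred : String) : List String :=
  [preferred, "gemini-1.5-flash", "gemini-1.5-flash-latest", "gemini-2.0-flash",
   "gemini-2.5-flash", "gemini-1.5-pro"]

def pick_gemini_model_name_py (preferred_model : String) (available_model_names : List String) : String :=
  let preferred := pvNorm preferred_model
  let model_map : PySem.Dict String String := available_model_names.foldl pvStep PySem.Dict.empty
  -- for candidate in [...]: if candidate and candidate in model_map: return model_map[candidate]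
  match (pvCandidates preferred).findSome?
      (fun candidate => if candidate ≠ "" then model_map.get? candidate else none) with
  | some name => name
  | none =>
    -- next((name for short_name, name in model_map.items() if 'flash' in short_name), '')
    let flash_match := ((model_map.items.find? (fun p => PySem.Str.isIn "flash" p.1)).map (·.2)).getD ""
    if flash_match ≠ "" then flash_match
    else
      -- if model_map: return next(iter(model_map.values()))
      match model_map.values with
      | v :: _ => v
      | [] => if preferred_model ≠ "" then preferred_model else "gemini-1.5-flash"

-- ===== PORT B =====
-- find_first(pred): first original name whose non-empty short name satisfies pred, else ''
def pvFindFirst (pred : String → Bool) : List String → String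
  | [] => ""
  | name :: rest =>
    let short := pvNorm name
    if short ≠ "" ∧ pred short then name else pvFindFirst pred rest

-- for candidate in [...]: if candidate: hit = find_first(s == candidate); if hit: return hit
def pvCandLoop (available : List String) : List String → String
  | [] => ""
  | c :: cs =>
    if c ≠ "" then
      let hit := pvFindFirst (fun s => s == c) available
      if hit ≠ "" then hit else pvCandLoop available cs
    else pvCandLoop available cs

def pick_gemini_model_name_py_alt (preferred_model : String) (available_model_names : List String) : String :=
  let preferred := pvNorm preferred_model
  let hit := pvCandLoop available_model_names (pvCandidates preferred)
  if hit ≠ "" then hit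
  else
    let flash := pvFindFirst (fun s => PySem.Str.isIn "flash" s) available_model_names
    if flash ≠ "" then flash
    else
      let anyName := pvFindFirst (fun _ => true) available_model_names
      if anyName ≠ "" then anyName
      else if preferred_model ≠ "" then preferred_model else "gemini-1.5-flash"

-- ===== PRECONDITION & SPEC =====
def Spec_pick_gemini_model_name_py (preferred_model : String) (available_model_names : List String) (out : String) : Prop := out = pick_gemini_model_name_py_alt preferred_model available_model_names
instance (preferred_model : String) (available_model_names : List String) (out : String) : Decidable (Spec_pick_gemini_model_name_py preferred_model available_model_names out) := by unfold Spec_pick_gemini_model_name_py; infer_instance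

-- ===== CLAIM (what is proved, stated in full; the proofs are below) =====
def Claim_equal_pick_gemini_model_name_py : Prop := ∀ (preferred_model : String) (available_model_names : List String), Dom_pick_gemini_model_name_py preferred_model available_model_names → Spec_pick_gemini_model_name_py preferred_model available_model_names (pick_gemini_model_name_py preferred_model available_model_names)

-- ===== LEMMAS AND PROOFS =====

-- first name in av whose non-empty short name satisfies pred, as an Option
def pvOFind (pred : String → Bool) (av : List String) : Option String :=
  av.findSome? (fun n => if pvNorm n ≠ "" ∧ pred (pvNorm n) then some n else none)

theorem pvFindFirst_eq (pred : String → Bool) (av : List String) :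
    pvFindFirst pred av = (pvOFind pred av).getD "" := by
  induction av with
  | nil => rfl
  | cons n rest ih =>
    simp only [pvFindFirst, pvOFind, List.findSome?_cons]
    split_ifs with h
    · simp
    · simpa [pvOFind, h] using ih

theorem pvOFind_ne_empty {pred : String → Bool} {av : List String} {r : String}
    (h : pvOFind pred av = some r) : r ≠ "" := by
  induction av with
  | nil => simp [pvOFind] at h
  | cons n rest ih =>
    simp only [pvOFind, List.findSome?_cons] at h
    by_cases hg : pvNorm n ≠ "" ∧ pred (pvNorm n) = true
    · rw [if_pos hg] at h
      cases h
      intro hr; subst hr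
      exact hg.1 rfl
    · rw [if_neg hg] at h
      exact ih h

theorem pvContains_find {d : PySem.Dict String String} {k : String} (pred : String → Bool)
    (hc : d.contains k = true) (hp : pred k = true) :
    ∃ p, d.items.find? (fun p => pred p.1) = some p := by
  rw [PySem.Dict.contains_eq_isSome_get? d k] at hc
  obtain ⟨v, hv⟩ := Option.isSome_iff_exists.mp hc
  have hmem := PySem.Dict.mem_items_of_get?_eq_some d hv
  have h : (d.items.find? (fun p => pred p.1)).isSome = true := by
    apply List.find?_isSome.mpr
    exact ⟨(k, v), hmem, hp⟩
  exact Option.isSome_iff_exists.mp h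

theorem pv_find_items_foldl (pred : String → Bool) (av : List String)
    (d : PySem.Dict String String) :
    ((av.foldl pvStep d).items.find? (fun p => pred p.1)) =
      (d.items.find? (fun p => pred p.1)).or ((pvOFind pred av).map (fun n => (pvNorm n, n))) := by
  induction av generalizing d with
  | nil => simp [pvOFind]
  | cons n rest ih =>
    simp only [List.foldl_cons]
    rw [ih]
    by_cases h1 : pvNorm n = ""
    · simp [pvStep, h1, pvOFind]
    · by_cases h2 : d.contains (pvNorm n) = true
      · have hstep : pvStep d n = d := by simp [pvStep, h2]
        rw [hstep]
        by_cases hp : pred (pvNorm n) = true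
        · obtain ⟨p, hfp⟩ := pvContains_find pred h2 hp
          simp [pvOFind, h1, hp, hfp]
        · simp [pvOFind, h1, hp]
      · have hstep : pvStep d n = d.insert (pvNorm n) n := by
          simp [pvStep, h1, eq_false_of_ne_true h2]
        rw [hstep, PySem.Dict.items_insert_of_not_contains d n (by simpa using h2)]
        rw [List.find?_append]
        by_cases hp : pred (pvNorm n) = true
        · simp [pvOFind, h1, hp]
        · simp [pvOFind, h1, hp]

theorem pvGet?_eq_find (d : PySem.Dict String String) (k : String) :
    d.get? k = (d.items.find? (fun p => p.1 == k)).map (·.2) := by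
  obtain ⟨l⟩ := d
  induction l with
  | nil => rfl
  | cons p rest ih =>
    obtain ⟨a, b⟩ := p
    rw [PySem.Dict.get?_mk_cons]
    by_cases h : a = k
    · simp [h]
    · simpa [List.find?_cons, h] using ih

-- lookups in A's dict ARE B's scans
theorem pvMap_find (pred : String → Bool) (av : List String) :
    ((av.foldl pvStep PySem.Dict.empty).items.find? (fun p => pred p.1)) =
      (pvOFind pred av).map (fun n => (pvNorm n, n)) := by
  rw [pv_find_items_foldl]
  simp [PySem.Dict.empty]

theorem pvMap_get? (av : List String) (c : String) :
    (av.foldl pvStep PySem.Dict.empty).get? c = pvOFind (fun s => s == c) av := by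
  rw [pvGet?_eq_find, pvMap_find (fun s => s == c) av]
  cases pvOFind (fun s => s == c) av <;> simp

theorem pvCandLoop_eq (av : List String) (cs : List String) :
    pvCandLoop av cs =
      (cs.findSome? (fun c => if c ≠ "" then pvOFind (fun s => s == c) av else none)).getD "" := by
  induction cs with
  | nil => rfl
  | cons c rest ih =>
    simp only [pvCandLoop, List.findSome?_cons]
    by_cases hc : c = ""
    · simpa [hc] using ih
    · simp only [hc, ne_eq, not_false_eq_true, if_true]
      rw [pvFindFirst_eq]
      cases hof : pvOFind (fun s => s == c) av with
      | none => simpa [hof] using ih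
      | some r =>
        have hr := pvOFind_ne_empty hof
        simp [hr]

theorem pvCandFind_ne_empty {av cs : List String} {r : String}
    (h : cs.findSome? (fun c => if c ≠ "" then pvOFind (fun s => s == c) av else none) = some r) :
    r ≠ "" := by
  induction cs with
  | nil => simp at h
  | cons c rest ih =>
    rw [List.findSome?_cons] at h
    cases hg : (if c ≠ "" then pvOFind (fun s => s == c) av else none) with
    | none => rw [hg] at h; exact ih h
    | some x =>
      rw [hg] at h
      simp only [] at h
      cases h
      by_cases hc : c = ""
      · simp [hc] at hg
      · rw [if_pos hc] at hg
        exact pvOFind_ne_empty hg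

theorem pv_head?_eq_find_true (l : List (String × String)) :
    l.find? (fun _ => true) = l.head? := by
  cases l <;> simp

-- ===== VERDICT (by name: the statement is the Claim_ definition above) =====
theorem pick_gemini_model_name_py_spec : Claim_equal_pick_gemini_model_name_py := by
  intro pm av _
  show pick_gemini_model_name_py pm av = pick_gemini_model_name_py_alt pm av
  unfold pick_gemini_model_name_py pick_gemini_model_name_py_alt
  simp only []
  have hfun : (fun c => if c ≠ "" then (av.foldl pvStep PySem.Dict.empty).get? c else none)
      = (fun c => if c ≠ "" then pvOFind (fun s => s == c) av else none) := by
    funext c; by_cases hc : c = "" <;> simp [hc, pvMap_get?]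
  rw [hfun, pvCandLoop_eq]
  cases hcf : (pvCandidates (pvNorm pm)).findSome?
      (fun c => if c ≠ "" then pvOFind (fun s => s == c) av else none) with
  | some r =>
    have hr := pvCandFind_ne_empty hcf
    simp [hr]
  | none =>
    simp only [Option.getD_none, ne_eq, not_true_eq_false, if_false]
    -- flash stage
    rw [pvMap_find, pvFindFirst_eq]
    cases hfl : pvOFind (fun s => PySem.Str.isIn "flash" s) av with
    | some r =>
      have hr := pvOFind_ne_empty hfl
      simp [hr]
    | none =>
      simp only [Option.map_none, Option.getD_none, not_true_eq_false, if_false]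
      -- any-name stage
      rw [pvFindFirst_eq]
      have hvals : (av.foldl pvStep PySem.Dict.empty).values
          = ((av.foldl pvStep PySem.Dict.empty).items).map (·.2) := rfl
      have hhd : ((av.foldl pvStep PySem.Dict.empty).items).head?
          = (pvOFind (fun _ => true) av).map (fun n => (pvNorm n, n)) := by
        rw [← pv_head?_eq_find_true, pvMap_find (fun _ => true) av]
      cases hany : pvOFind (fun _ => true) av with
      | some r =>
        have hr := pvOFind_ne_empty hany
        have : (av.foldl pvStep PySem.Dict.empty).values = r :: (((av.foldl pvStep PySem.Dict.empty).items).tail.map (·.2)) := by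
          rw [hvals]
          cases hit : (av.foldl pvStep PySem.Dict.empty).items with
          | nil => rw [hit] at hhd; simp [hany] at hhd
          | cons p rest =>
            rw [hit] at hhd; simp [hany] at hhd
            simp [hhd]
        rw [this]
        simp [hr]
      | none =>
        have : (av.foldl pvStep PySem.Dict.empty).values = [] := by
          rw [hvals]
          cases hit : (av.foldl pvStep PySem.Dict.empty).items with
          | nil => simp
          | cons p rest => rw [hit] at hhd; simp [hany] at hhd
        rw [this]
        simp
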